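-- pv_equiv track=rewrite | github.com/JrDemiurg/AOIS | lab3/minimization.py | expression_to_array
-- ===== SOURCE A (Python) =====
-- def expression_to_array(expression):
--     variables = sorted(set(char for char in expression if char.isalpha()))
--     result = []
--     sign = False
--     for char in expression:
--         if char.isalpha():
--             if sign:
--                 result.append(f"!{char}")
--                 sign = False
--             else:
--                 result.append(f"{char}")
--         sign = True if char == '!' else sign
--     return tuple(tuple(result[i:i + len(variables)]) for i in range(0, len(result), len(variables)))
-- ===== SOURCE B (Python) =====
-- def expression_to_array(expression):
--     letters = [(i, ch) for i, ch in enumerate(expression) if ch.isalpha()]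
--     result = []
--     prev = -1
--     for i, ch in letters:
--         gap = expression[prev + 1:i]
--         result.append('!' + ch if '!' in gap else ch)
--         prev = i
--     variables = sorted(set(char for char in expression if char.isalpha()))
--     return tuple(tuple(result[i:i + len(variables)]) for i in range(0, len(result), len(variables)))
-- ===== Notes on version B (the rewrite author's own statement) =====
-- stated objective: alternative
-- what changed: Replaces A's running negation flag threaded through a character-by-character scan with a precomputed list of letter positions; each literal's negation is decided by testing '!' in the slice of the expression between consecutive letters.
import Mathlib
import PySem

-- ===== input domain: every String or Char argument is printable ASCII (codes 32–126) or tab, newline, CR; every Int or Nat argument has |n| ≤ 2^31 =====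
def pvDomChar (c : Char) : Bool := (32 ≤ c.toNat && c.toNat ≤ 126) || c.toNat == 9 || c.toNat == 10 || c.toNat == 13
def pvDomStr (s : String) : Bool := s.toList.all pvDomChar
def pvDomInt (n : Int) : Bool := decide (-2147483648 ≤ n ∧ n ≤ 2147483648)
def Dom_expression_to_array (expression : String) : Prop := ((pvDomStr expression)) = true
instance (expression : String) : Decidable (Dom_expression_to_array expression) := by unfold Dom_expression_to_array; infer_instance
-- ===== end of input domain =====

-- B replaces A's running negation flag with precomputed letter positions and a '!'-in-gap-slice test; objective: alternative decomposition.

-- ===== PORT A =====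
-- loop body of A's for-loop (append literal when alphabetic, then update the sign flag)
def pvStepA (st : List String × Bool) (c : Char) : List String × Bool :=
  let st := if PySem.Chars.isalpha c then
      (st.1 ++ [if st.2 then "!" ++ c.toString else c.toString], false)
    else st
  (st.1, if c = '!' then true else st.2)

def expression_to_array (expression : String) : List (List String) :=
  let cs := expression.toList
  let vars := PySem.List.sorted (PySem.Set.ofList (cs.filter (fun c => PySem.Chars.isalpha c))) (fun x => x) false
  let result := (cs.foldl pvStepA ([], false)).1
  (PySem.List.pyRange 0 (result.length : Int) (vars.length : Int)).map
    (fun i => PySem.List.slice result (some i) (some (i + (vars.length : Int))))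

-- ===== PORT B =====
-- loop body of B's for-loop over letter positions: negation decided by '!' in the gap slice since the previous letter
def pvStepB (orig : List Char) (st : List String × Int) (p : Int × Char) : List String × Int :=
  let gap := PySem.List.slice orig (some (st.2 + 1)) (some p.1)
  (st.1 ++ [if PySem.Chars.isIn ['!'] gap then "!" ++ p.2.toString else p.2.toString], p.1)

def expression_to_array_alt (expression : String) : List (List String) :=
  let cs := expression.toList
  let letters := (PySem.List.enumerate cs 0).filter (fun p => PySem.Chars.isalpha p.2)
  let result := (letters.foldl (pvStepB cs) ([], -1)).1
  let vars := PySem.List.sorted (PySem.Set.ofList (cs.filter (fun c => PySem.Chars.isalpha c))) (fun x => x) false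
  (PySem.List.pyRange 0 (result.length : Int) (vars.length : Int)).map
    (fun i => PySem.List.slice result (some i) (some (i + (vars.length : Int))))

-- ===== PRECONDITION & SPEC =====
-- Pre_ excludes expressions with no alphabetic character: there the final range(0, 0, 0) makes Python A raise ValueError (B raises too).
def Pre_expression_to_array (expression : String) : Prop :=
  (expression.toList.any (fun c => PySem.Chars.isalpha c)) = true
instance (expression : String) : Decidable (Pre_expression_to_array expression) := by
  unfold Pre_expression_to_array; infer_instance

def pvWitness_expression_to_array : String := "!a&b"

def Spec_expression_to_array (expression : String) (out : List (List String)) : Prop := out = expression_to_array_alt expression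
instance (expression : String) (out : List (List String)) : Decidable (Spec_expression_to_array expression out) := by unfold Spec_expression_to_array; infer_instance

-- ===== CLAIM (what is proved, stated in full; the proofs are below) =====
def Claim_equal_expression_to_array : Prop := ∀ (expression : String), Dom_expression_to_array expression → Pre_expression_to_array expression → Spec_expression_to_array expression (expression_to_array expression)

-- ===== LEMMAS AND PROOFS =====

-- the sequence of literals both loops produce, as a structural recursion (A's view)
def pvLits : Bool → List Char → List String
  | _, [] => []
  | sign, c :: rest =>
    if PySem.Chars.isalpha c then
      (if sign then "!" ++ c.toString else c.toString) :: pvLits false rest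
    else
      pvLits (if c = '!' then true else sign) rest

theorem pv_alpha_ne_bang (c : Char) (h : PySem.Chars.isalpha c = true) : c ≠ '!' := by
  rintro rfl; exact absurd h (by decide)

theorem pv_isIn_iff (l : List Char) : PySem.Chars.isIn ['!'] l = true ↔ '!' ∈ l := by
  rw [PySem.Chars.isIn_iff_infix, List.singleton_infix_iff]

theorem pv_isIn_nil : PySem.Chars.isIn ['!'] ([] : List Char) = false := by
  rw [PySem.Chars.isIn_eq_false_iff]; simp

theorem pv_isIn_snoc (xs : List Char) (c : Char) :
    PySem.Chars.isIn ['!'] (xs ++ [c]) = (if c = '!' then true else PySem.Chars.isIn ['!'] xs) := by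
  rw [Bool.eq_iff_iff]
  by_cases hc : c = '!' <;> simp [hc, pv_isIn_iff]
  exact fun h => absurd h.symm hc

theorem pv_slice_empty (orig : List Char) (m : Int) (hm : 0 ≤ m) :
    PySem.List.slice orig (some m) (some m) = [] := by
  rw [PySem.List.slice_toNat orig hm hm]; simp

theorem pv_slice_snoc (orig : List Char) (a : Int) (k : Nat) (c : Char)
    (ha : 0 ≤ a) (hak : a ≤ (k : Int)) (hget : orig[k]? = some c) :
    PySem.List.slice orig (some a) (some ((k : Int) + 1))
      = PySem.List.slice orig (some a) (some (k : Int)) ++ [c] := by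
  rw [PySem.List.slice_toNat orig ha (by omega), PySem.List.slice_toNat orig ha (by omega)]
  have h1 : ((k : Int) + 1).toNat = k + 1 := by omega
  have h2 : ((k : Int)).toNat = k := by omega
  have hm : a.toNat ≤ k := by omega
  rw [h1, h2]
  have h3 : k + 1 - a.toNat = (k - a.toNat) + 1 := by omega
  rw [h3, List.take_add_one]
  have h4 : (orig.drop a.toNat)[k - a.toNat]? = some c := by
    rw [List.getElem?_drop]
    have : a.toNat + (k - a.toNat) = k := by omega
    rw [this]; exact hget
  rw [h4]; rfl

theorem pv_foldA (cs : List Char) (res : List String) (sign : Bool) :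
    (cs.foldl pvStepA (res, sign)).1 = res ++ pvLits sign cs := by
  induction cs generalizing res sign with
  | nil => simp [pvLits]
  | cons c rest ih =>
    by_cases ha : PySem.Chars.isalpha c = true
    · have hc := pv_alpha_ne_bang c ha
      simp [List.foldl_cons, pvStepA, ha, hc, pvLits, ih]
    · simp [List.foldl_cons, pvStepA, ha, pvLits, ih]

theorem pv_foldB (orig : List Char) (cs : List Char) :
    ∀ (k : Nat) (prev : Int) (res : List String),
    orig.drop k = cs → 0 ≤ prev + 1 → prev + 1 ≤ (k : Int) →
    (((PySem.List.enumerate cs (k : Int)).filter (fun p => PySem.Chars.isalpha p.2)).foldl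
        (pvStepB orig) (res, prev)).1
      = res ++ pvLits (PySem.Chars.isIn ['!'] (PySem.List.slice orig (some (prev + 1)) (some (k : Int)))) cs := by
  induction cs with
  | nil => intro k prev res _ _ _; simp [PySem.List.enumerate_nil, pvLits]
  | cons c rest ih =>
    intro k prev res hdrop hprev hprevk
    have hk : k < orig.length := by
      have := congrArg List.length hdrop
      simp [List.length_drop] at this
      omega
    have hget : orig[k]? = some c := by
      have h0 : (orig.drop k)[0]? = some c := by rw [hdrop]; rfl
      rw [List.getElem?_drop] at h0
      simpa using h0
    have hdrop' : orig.drop (k + 1) = rest := by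
      have := congrArg (List.drop 1) hdrop
      simpa [List.drop_drop, Nat.add_comm] using this
    rw [PySem.List.enumerate_cons]
    by_cases ha : PySem.Chars.isalpha c = true
    · have hc := pv_alpha_ne_bang c ha
      have ihh := ih (k + 1) ((k : Int))
        (res ++ [if PySem.Chars.isIn ['!'] (PySem.List.slice orig (some (prev + 1)) (some (k : Int))) then "!" ++ c.toString else c.toString])
        hdrop' (by omega) (by push_cast; omega)
      simp only [List.filter_cons, ha, if_true, List.foldl_cons]
      rw [show ((k : Nat) + 1 : Nat) = k + 1 from rfl] at ihh
      have hcast : (((k + 1 : Nat) : Int)) = (k : Int) + 1 := by push_cast; ring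
      rw [hcast] at ihh
      rw [pv_slice_empty orig ((k : Int) + 1) (by omega), pv_isIn_nil] at ihh
      simp only [pvStepB]
      rw [ihh]
      simp [pvLits, ha]
    · have ihh := ih (k + 1) prev res hdrop' hprev (by push_cast; omega)
      have hcast : (((k + 1 : Nat) : Int)) = (k : Int) + 1 := by push_cast; ring
      rw [hcast] at ihh
      rw [pv_slice_snoc orig (prev + 1) k c hprev hprevk hget, pv_isIn_snoc] at ihh
      simp only [List.filter_cons, ha]
      simp only [Bool.false_eq_true, if_false]
      rw [ihh]
      simp [pvLits, ha]

theorem pv_result_eq (cs : List Char) :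
    ((((PySem.List.enumerate cs 0).filter (fun p => PySem.Chars.isalpha p.2)).foldl
        (pvStepB cs) ([], -1)).1 : List String)
      = (cs.foldl pvStepA ([], false)).1 := by
  have hB := pv_foldB cs cs 0 (-1) [] (by simp) (by norm_num) (by norm_num)
  have hA := pv_foldA cs [] false
  simp only [Nat.cast_zero, neg_add_cancel] at hB
  rw [pv_slice_empty cs 0 le_rfl, pv_isIn_nil] at hB
  rw [hB, hA]

-- ===== VERDICT (by name: the statement is the Claim_ definition above) =====
theorem expression_to_array_spec : Claim_equal_expression_to_array := by
  intro e _ _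
  unfold Spec_expression_to_array
  simp only [expression_to_array, expression_to_array_alt]
  rw [pv_result_eq]
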